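-- pv_equiv track=rewrite | github.com/YavuzVoid/algorithm-solutions | hackerrank/hard/subarrays_with_given_sum_and_bounded_maximum.py | countSubarraysWithSumAndMaxAtMost
-- ===== SOURCE A (Python) =====
-- def countSubarraysWithSumAndMaxAtMost(nums, k, M):
--     count = 0
--     n = len(nums)
--     i = 0
--     while i < n:
--         if nums[i] > M:
--             i += 1
--             continue
--         j = i
--         while j < n and nums[j] <= M:
--             j += 1
--         sub = nums[i:j]
--         prefix = {0: 1}
--         total = 0
--         for val in sub:
--             total += val
--             if (total - k) in prefix:
--                 count += prefix[total - k]
--             prefix[total] = prefix.get(total, 0) + 1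
--         i = j
--     return count
-- ===== SOURCE B (Python) =====
-- def countSubarraysWithSumAndMaxAtMost(nums, k, M):
--     # Direct scan: for every start position, walk right while elements stay <= M,
--     # keeping a running sum and counting each time it hits k. No prefix-sum dict.
--     total = 0
--     rest = nums
--     while rest:
--         s = 0
--         c = 0
--         for x in rest:
--             if x > M:
--                 break
--             s += x
--             if s == k:
--                 c += 1
--         total += c
--         rest = rest[1:]
--     return total
-- ===== Notes on version B (the rewrite author's own statement) =====
-- stated objective: simpler
-- what changed: Dropped the run-partitioning and the prefix-sum hashmap: B scans directly from every start position while elements stay <= M, counting each time the running sum hits k.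
import Mathlib
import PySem

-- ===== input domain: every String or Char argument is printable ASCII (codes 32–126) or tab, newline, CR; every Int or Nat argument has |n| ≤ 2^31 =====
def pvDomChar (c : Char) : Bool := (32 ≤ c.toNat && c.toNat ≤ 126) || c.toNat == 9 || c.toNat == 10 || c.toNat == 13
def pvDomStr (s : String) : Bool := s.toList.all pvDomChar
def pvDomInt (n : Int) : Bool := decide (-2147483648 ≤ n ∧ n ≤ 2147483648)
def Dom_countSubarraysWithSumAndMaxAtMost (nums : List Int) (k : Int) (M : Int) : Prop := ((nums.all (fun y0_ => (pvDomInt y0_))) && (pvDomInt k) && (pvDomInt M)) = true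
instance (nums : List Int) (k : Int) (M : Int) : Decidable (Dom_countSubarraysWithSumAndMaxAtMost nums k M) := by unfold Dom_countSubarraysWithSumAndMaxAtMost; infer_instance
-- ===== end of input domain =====

-- B replaces A's run-partitioning + prefix-sum hashmap by a direct rescan from every
-- start position (simpler: no dict, no slicing); equal return value proved on Dom.


-- ===== PORT A =====
-- inner 'while j < n and nums[j] <= M: j += 1' (fuel makes the same scan total; fuel = n suffices)
def pvFindJ (nums : List Int) (M : Int) : Nat → Int → Int
  | 0, j => j
  | fuel + 1, j =>
    if j < (nums.length : Int) then
      match PySem.List.pyGet? nums j with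
      | some v => if v ≤ M then pvFindJ nums M fuel (j + 1) else j
      | none => j
    else j

-- 'for val in sub: total += val; if (total-k) in prefix: count += prefix[total-k]; prefix[total] = prefix.get(total,0)+1'
def pvDictLoop (k : Int) : List Int → PySem.Dict Int Int → Int → Int → Int
  | [], _, _, count => count
  | v :: rest, pre, total, count =>
    let total' := total + v
    let count' := match pre.get? (total' - k) with
      | some c => count + c
      | none => count
    pvDictLoop k rest (pre.insert total' (pre.getD total' 0 + 1)) total' count'

-- outer 'while i < n' loop (fuel makes the same loop total; i strictly increases, so n+1 suffices)
def pvOuter (nums : List Int) (k M : Int) : Nat → Int → Int → Int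
  | 0, _, count => count
  | fuel + 1, i, count =>
    if i < (nums.length : Int) then
      match PySem.List.pyGet? nums i with
      | some v =>
        if v > M then pvOuter nums k M fuel (i + 1) count
        else
          let j := pvFindJ nums M nums.length i
          let sub := PySem.List.slice nums (some i) (some j)
          pvOuter nums k M fuel j (pvDictLoop k sub ((PySem.Dict.empty).insert 0 1) 0 count)
      | none => count
    else count

def countSubarraysWithSumAndMaxAtMost (nums : List Int) (k : Int) (M : Int) : Int :=
  pvOuter nums k M (nums.length + 1) 0 0

-- ===== PORT B =====
-- 'for x in rest: if x > M: break; s += x; if s == k: c += 1'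
def pvCountFrom (k M : Int) : List Int → Int → Int → Int
  | [], _, c => c
  | x :: r, s, c =>
    if x > M then c
    else pvCountFrom k M r (s + x) (if s + x = k then c + 1 else c)

-- 'while rest: total += c; rest = rest[1:]'
def pvAltGo (k M : Int) : List Int → Int → Int
  | [], total => total
  | x :: r, total => pvAltGo k M r (total + pvCountFrom k M (x :: r) 0 0)

def countSubarraysWithSumAndMaxAtMost_alt (nums : List Int) (k : Int) (M : Int) : Int :=
  pvAltGo k M nums 0

-- ===== PRECONDITION & SPEC =====
def Spec_countSubarraysWithSumAndMaxAtMost (nums : List Int) (k : Int) (M : Int) (out : Int) : Prop := out = countSubarraysWithSumAndMaxAtMost_alt nums k M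
instance (nums : List Int) (k : Int) (M : Int) (out : Int) : Decidable (Spec_countSubarraysWithSumAndMaxAtMost nums k M out) := by unfold Spec_countSubarraysWithSumAndMaxAtMost; infer_instance

-- ===== CLAIM (what is proved, stated in full; the proofs are below) =====
def Claim_equal_countSubarraysWithSumAndMaxAtMost : Prop := ∀ (nums : List Int) (k : Int) (M : Int), Dom_countSubarraysWithSumAndMaxAtMost nums k M → Spec_countSubarraysWithSumAndMaxAtMost nums k M (countSubarraysWithSumAndMaxAtMost nums k M)

-- ===== LEMMAS AND PROOFS =====

-- number of nonempty prefixes of l summing to k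
def cntPre (k : Int) : List Int → Int
  | [] => 0
  | v :: r => (if v = k then 1 else 0) + cntPre (k - v) r

-- sum of cntPre over all proper tail start positions
def cntW (k : Int) : List Int → Int
  | [] => 0
  | _ :: r => cntPre k r + cntW k r

theorem pvAltGo_acc (k M : Int) (l : List Int) : ∀ (t : Int),
    pvAltGo k M l t = t + pvAltGo k M l 0 := by
  induction l with
  | nil => intro t; simp [pvAltGo]
  | cons x r ih =>
    intro t
    simp only [pvAltGo]
    rw [ih, ih (0 + _)]
    ring

-- B's inner scan over (run ++ barrier) counts the prefixes of the run summing to k - s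
theorem pvCountFrom_run (k M : Int) (r s2 : List Int)
    (hr : ∀ x ∈ r, x ≤ M) (hs : s2 = [] ∨ ∃ y ys, s2 = y :: ys ∧ M < y) :
    ∀ s c, pvCountFrom k M (r ++ s2) s c = c + cntPre (k - s) r := by
  induction r with
  | nil =>
    intro s c
    rcases hs with h | ⟨y, ys, h, hy⟩ <;> simp [h, pvCountFrom, cntPre]
    intro h'; omega
  | cons v rr ih =>
    intro s c
    have hv : v ≤ M := hr v (by simp)
    simp only [List.cons_append, pvCountFrom, if_neg (by omega : ¬ v > M)]
    rw [ih (fun x hx => hr x (by simp [hx]))]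
    simp only [cntPre]
    rw [show k - (s + v) = k - s - v by ring]
    split_ifs with h1 h2 <;> [linarith; omega; omega; linarith]

-- B's outer loop over (run ++ barrier) = per-run pair count + B over the barrier suffix
theorem pvAltGo_run (k M : Int) (s2 : List Int)
    (hs : s2 = [] ∨ ∃ y ys, s2 = y :: ys ∧ M < y) :
    ∀ (r : List Int), (∀ x ∈ r, x ≤ M) →
    pvAltGo k M (r ++ s2) 0 = (cntPre k r + cntW k r) + pvAltGo k M s2 0 := by
  intro r
  induction r with
  | nil => intro _; simp [cntPre, cntW]
  | cons v rr ih =>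
    intro hr
    simp only [List.cons_append, pvAltGo]
    rw [show v :: (rr ++ s2) = (v :: rr) ++ s2 from rfl,
      pvCountFrom_run k M (v :: rr) s2 hr hs 0 0]
    rw [pvAltGo_acc, ih (fun x hx => hr x (by simp [hx])), cntW]
    rw [show k - 0 = k by ring]
    ring

theorem cnt_ind (P : List Int) (a : Int) :
    (P.map (fun s => if s = a then (1:Int) else 0)).sum = (P.count a : Int) := by
  have : (fun s : Int => if s = a then (1:Int) else 0)
       = (fun s : Int => if (s == a) = true then (1:Int) else 0) := by funext s; simp
  rw [this, PySem.List.sum_map_ite_one_zero, List.count]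

-- dict-loop invariant: d counts the multiset P of previously seen prefix sums
theorem pvDictLoop_inv (k : Int) (l : List Int) :
    ∀ (d : PySem.Dict Int Int) (P : List Int) (t c : Int),
      (∀ s : Int, d.getD s 0 = (P.count s : Int)) →
      pvDictLoop k l d t c
        = c + (P.map (fun s => cntPre (k + s - t) l)).sum + cntW k l := by
  induction l with
  | nil =>
    intro d P t c _
    simp [pvDictLoop, cntPre, cntW]
  | cons v r ih =>
    intro d P t c h
    simp only [pvDictLoop]
    have hc : (match d.get? (t + v - k) with | some x => c + x | none => c)
        = c + (P.count (t + v - k) : Int) := by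
      have hh := h (t + v - k)
      rw [PySem.Dict.getD_eq_get?_getD] at hh
      cases hg : d.get? (t + v - k) <;> rw [hg] at hh <;> simp at hh <;> simp [hh]
    have hinv : ∀ s : Int, (d.insert (t + v) (d.getD (t + v) 0 + 1)).getD s 0
        = ((P ++ [t + v]).count s : Int) := by
      intro s
      rw [PySem.Dict.getD_insert, List.count_append]
      by_cases hs : s = t + v
      · simp [hs, h (t + v)]
      · simp [hs, h s, Ne.symm hs]
    rw [ih _ (P ++ [t + v]) _ _ hinv, hc]
    simp only [List.map_append, List.sum_append, List.map_cons, List.map_nil,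
      List.sum_cons, List.sum_nil, cntW]
    have e1 : cntPre (k + (t + v) - (t + v)) r = cntPre k r := by ring_nf
    have e2 : (P.map (fun s => cntPre (k + s - (t + v)) r)).sum
        = (P.map (fun s => cntPre (k + s - t - v) r)).sum := by
      congr 1; apply List.map_congr_left; intro s _; ring_nf
    have e3 : (P.map (fun s => cntPre (k + s - t) (v :: r))).sum
        = (P.count (t + v - k) : Int) + (P.map (fun s => cntPre (k + s - t - v) r)).sum := by
      have hfun : (fun s => cntPre (k + s - t) (v :: r))
           = (fun s => (if s = t + v - k then (1:Int) else 0) + cntPre (k + s - t - v) r) := by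
        funext s
        simp only [cntPre]
        congr 1
        by_cases hv : v = k + s - t
        · rw [if_pos hv, if_pos (by omega)]
        · rw [if_neg hv, if_neg (by omega)]
      rw [hfun, PySem.List.sum_map_add_int, cnt_ind]
    rw [e1, e2, e3]
    ring

-- A's dict loop started on {0: 1} counts exactly the subarrays of the run summing to k
theorem pvDictLoop_run (k : Int) (r : List Int) (c : Int) :
    pvDictLoop k r ((PySem.Dict.empty).insert 0 1) 0 c = c + (cntPre k r + cntW k r) := by
  have hinv : ∀ s : Int,
      ((PySem.Dict.empty : PySem.Dict Int Int).insert 0 1).getD s 0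
        = (([0] : List Int).count s : Int) := by
    intro s
    rw [PySem.Dict.getD_insert]
    by_cases hs : s = 0 <;> simp [hs, PySem.Dict.getD_empty, Ne.symm]
  rw [pvDictLoop_inv k r _ [0] 0 c hinv]
  simp only [List.map_cons, List.map_nil, List.sum_cons, List.sum_nil]
  rw [show k + 0 - 0 = k by ring]
  ring

theorem pvFindJ_spec (nums : List Int) (M : Int) :
    ∀ (fuel i : Nat), nums.length - i ≤ fuel →
      pvFindJ nums M fuel (i : Int)
        = ((i + ((nums.drop i).takeWhile (fun x => decide (x ≤ M))).length : Nat) : Int) := by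
  intro fuel
  induction fuel with
  | zero =>
    intro i hi
    have : nums.drop i = [] := List.drop_eq_nil_of_le (by omega)
    simp [pvFindJ, this]
  | succ f ih =>
    intro i hi
    by_cases hlt : i < nums.length
    · have hcast : (i : Int) < (nums.length : Int) := by exact_mod_cast hlt
      have hget : PySem.List.pyGet? nums (i : Int) = some nums[i] := by
        rw [PySem.List.pyGet?_natCast]
        simp [hlt]
      have hdrop : nums.drop i = nums[i] :: nums.drop (i + 1) :=
        List.drop_eq_getElem_cons hlt
      rw [pvFindJ, if_pos hcast, hget]
      dsimp only
      by_cases hv : nums[i] ≤ M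
      · rw [if_pos hv]
        rw [show (i : Int) + 1 = ((i + 1 : Nat) : Int) by push_cast; ring]
        rw [ih (i + 1) (by omega)]
        rw [hdrop, List.takeWhile_cons_of_pos (by simpa using hv)]
        simp only [List.length_cons]
        push_cast; ring
      · rw [if_neg hv]
        rw [hdrop, List.takeWhile_cons_of_neg (by simpa using hv)]
        simp
    · have hcast : ¬ (i : Int) < (nums.length : Int) := by exact_mod_cast hlt
      have hnil : nums.drop i = [] := List.drop_eq_nil_of_le (by omega)
      rw [pvFindJ, if_neg hcast, hnil]
      simp

theorem dropWhile_head_false (p : Int → Bool) (l : List Int) (y : Int) (ys : List Int)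
    (h : l.dropWhile p = y :: ys) : p y = false := by
  induction l with
  | nil => simp at h
  | cons x xs ih =>
    rw [List.dropWhile_cons] at h
    split at h
    · exact ih h
    · next hx => cases h; simpa using hx

theorem pvOuter_spec (nums : List Int) (k M : Int) :
    ∀ (fuel i : Nat) (count : Int), nums.length - i < fuel →
      pvOuter nums k M fuel (i : Int) count = count + pvAltGo k M (nums.drop i) 0 := by
  intro fuel
  induction fuel with
  | zero => intro i count h; omega
  | succ f ih =>
    intro i count hi
    by_cases hlt : i < nums.length
    · have hcast : (i : Int) < (nums.length : Int) := by exact_mod_cast hlt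
      have hget : PySem.List.pyGet? nums (i : Int) = some nums[i] := by
        rw [PySem.List.pyGet?_natCast]
        simp [hlt]
      have hdrop : nums.drop i = nums[i] :: nums.drop (i + 1) :=
        List.drop_eq_getElem_cons hlt
      rw [pvOuter, if_pos hcast, hget]
      dsimp only
      by_cases hv : nums[i] > M
      · rw [if_pos hv]
        rw [show (i : Int) + 1 = ((i + 1 : Nat) : Int) by push_cast; ring]
        rw [ih (i + 1) count (by omega)]
        rw [hdrop, pvAltGo]
        have hcf : pvCountFrom k M (nums[i] :: nums.drop (i + 1)) 0 0 = 0 := by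
          simp only [pvCountFrom, if_pos hv]
        rw [hcf]
        norm_num
      · rw [if_neg hv]
        have hJ := pvFindJ_spec nums M nums.length i (by omega)
        rw [hJ]
        set p := fun x : Int => decide (x ≤ M) with hp
        set run := (nums.drop i).takeWhile p with hrun
        set rest := (nums.drop i).dropWhile p with hrest
        have hsplit : run ++ rest = nums.drop i := List.takeWhile_append_dropWhile
        have hrunpos : 1 ≤ run.length := by
          rw [hrun, hdrop, List.takeWhile_cons_of_pos (by simp [hp]; omega)]
          simp
        have hslice : PySem.List.slice nums (some (i : Int))
            (some ((i + run.length : Nat) : Int)) = run := by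
          rw [show ((i + run.length : Nat) : Int) = (i : Int) + (run.length : Int) by
            push_cast; ring]
          rw [PySem.List.slice_natCast_add]
          exact (List.prefix_iff_eq_take.mp (List.takeWhile_prefix p)).symm
        rw [hslice, pvDictLoop_run]
        rw [ih (i + run.length) _ (by omega)]
        have hdd : nums.drop (i + run.length) = rest := by
          rw [← List.drop_drop, ← hsplit, List.drop_left]
        rw [hdd]
        have hbar : rest = [] ∨ ∃ y ys, rest = y :: ys ∧ M < y := by
          cases he : rest with
          | nil => exact Or.inl rfl
          | cons y ys =>
            refine Or.inr ⟨y, ys, rfl, ?_⟩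
            have := dropWhile_head_false p (nums.drop i) y ys (by rw [← hrest, he])
            simp [hp] at this
            omega
        have hle : ∀ x ∈ run, x ≤ M := by
          intro x hx
          have := List.mem_takeWhile_imp hx
          simpa [hp] using this
        rw [← hsplit, pvAltGo_run k M rest hbar run hle]
        ring
    · have hcast : ¬ (i : Int) < (nums.length : Int) := by exact_mod_cast hlt
      have hnil : nums.drop i = [] := List.drop_eq_nil_of_le (by omega)
      rw [pvOuter, if_neg hcast, hnil]
      simp [pvAltGo]

-- ===== VERDICT (by name: the statement is the Claim_ definition above) =====
theorem countSubarraysWithSumAndMaxAtMost_spec : Claim_equal_countSubarraysWithSumAndMaxAtMost := by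
  intro nums k M _
  unfold Spec_countSubarraysWithSumAndMaxAtMost countSubarraysWithSumAndMaxAtMost countSubarraysWithSumAndMaxAtMost_alt
  have h := pvOuter_spec nums k M (nums.length + 1) 0 0 (by omega)
  simpa using h
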